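-- pv_equiv track=rewrite | github.com/yago-mendoza/the-algorithms | near_convergence_array_checker.py | check_near_array_convergence_v1
-- ===== SOURCE A (Python) =====
-- def check_near_array_convergence_v1 (arr):
--     if len(set(arr)) == 1:
--         return arr.pop()
--     set_a = set([(arr[0]+1)%10, arr[0], (arr[0]-1)%10])
--     set_b = set()
--     for x in arr[1:] :
--         set_b.update({(x+1)%10,x,(x-1)%10})
--         if len(set_a & set_b)==0:
--             return -1
--         else:
--             set_a = set_a & set_b
--             set_b = set()
--     return set_a.pop()
-- ===== SOURCE B (Python) =====
-- def check_near_array_convergence_v1(arr):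
--     # Generate-and-test over the three candidate centers around the first element,
--     # instead of A's streaming set-intersection pass. Like A, pops from arr when all
--     # elements are equal, and raises IndexError on an empty list (as A does).
--     if len(set(arr)) == 1:
--         return arr.pop()
--     c = arr[0]
--     good = [d for d in ((c - 1) % 10, c, (c + 1) % 10)
--             if all(x == d or (x + 1) % 10 == d or (x - 1) % 10 == d for x in arr)]
--     return good[0] if good else -1
-- ===== Notes on version B (the rewrite author's own statement) =====
-- stated objective: simpler
-- what changed: B replaces A's streaming per-element set-intersection loop (building and intersecting neighbor sets as it scans) by a generate-and-test over the three fixed candidate centers taken from the first element's neighborhood, each checked against every element in one comprehension.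
-- outside the precondition, e.g. on check_near_array_convergence_v1([8, 18]): A returns 9, B returns 7; on check_near_array_convergence_v1([5, 6]): A returns 5, B returns 5
import Mathlib
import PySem

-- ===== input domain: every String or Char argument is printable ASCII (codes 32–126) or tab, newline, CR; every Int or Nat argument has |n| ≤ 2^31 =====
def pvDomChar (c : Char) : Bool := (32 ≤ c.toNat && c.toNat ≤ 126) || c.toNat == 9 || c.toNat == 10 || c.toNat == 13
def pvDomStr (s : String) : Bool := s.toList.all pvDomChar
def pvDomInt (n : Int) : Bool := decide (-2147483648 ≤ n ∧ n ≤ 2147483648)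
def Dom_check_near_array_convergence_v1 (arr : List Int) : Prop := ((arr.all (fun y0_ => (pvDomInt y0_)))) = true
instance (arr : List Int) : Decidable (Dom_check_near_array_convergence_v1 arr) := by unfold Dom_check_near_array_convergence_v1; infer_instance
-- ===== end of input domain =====

-- B replaces A's streaming set-intersection loop by a generate-and-test over the three
-- candidate centers around the first element; the equivalence is about the RETURN value
-- (both versions pop from arr in the all-equal branch, an observable mutation).

-- ===== PORT A =====
-- {(x+1)%10, x, (x-1)%10} in Python's set-literal insertion order
def pvNbr (x : Int) : PySem.Set Int :=
  PySem.Set.ofList [PySem.Int.mod (x + 1) 10, x, PySem.Int.mod (x - 1) 10]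

-- the 'for x in arr[1:]' loop with its early 'return -1'
def pvLoopA (set_a : PySem.Set Int) (xs : List Int) : Int :=
  match xs with
  | [] => set_a.headD (-1)  -- set_a.pop(); under Pre_ set_a is a singleton here, so hash order cannot matter
  | x :: rest =>
      let set_b := pvNbr x   -- set_b.update({…}) on the emptied set_b
      let i := PySem.Set.inter set_a set_b
      if PySem.Set.len i == 0 then -1 else pvLoopA i rest

def check_near_array_convergence_v1 (arr : List Int) : Int :=
  if PySem.Set.len (PySem.Set.ofList arr) == 1 then arr.getLastD 0  -- arr.pop(); guard ⇒ arr ≠ []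
  else
    match PySem.List.pyGet? arr 0 with
    | none => 0  -- first-element access raises IndexError (empty arr); excluded by Pre_
    | some c => pvLoopA (pvNbr c) (PySem.List.slice arr (some 1) none)

-- ===== PORT B =====
def pvNear (d x : Int) : Bool :=
  x == d || PySem.Int.mod (x + 1) 10 == d || PySem.Int.mod (x - 1) 10 == d

def check_near_array_convergence_v1_alt (arr : List Int) : Int :=
  if PySem.Set.len (PySem.Set.ofList arr) == 1 then arr.getLastD 0  -- arr.pop(); B keeps A's first branch verbatim
  else
    match PySem.List.pyGet? arr 0 with
    | none => 0  -- first-element access raises IndexError (empty arr); excluded by Pre_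
    | some c =>
      let good := [PySem.Int.mod (c - 1) 10, c, PySem.Int.mod (c + 1) 10].filter
        (fun d => arr.all (fun x => pvNear d x))
      match good with
      | [] => -1
      | g :: _ => g

-- ===== PRECONDITION & SPEC =====
-- Pre_ excludes the empty list (the first-element access raises IndexError in both versions) and the
-- non-constant lists on which two or more candidate centers fit every element: there
-- A's value is the accidental hash-order result of set.pop() on a multi-element set,
-- a corner where returning any of the common centers is equally defensible.
def Pre_check_near_array_convergence_v1 (arr : List Int) : Prop :=
  arr ≠ [] ∧
  ((∀ x ∈ arr, x = arr.headD 0) ∨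
   ([PySem.Int.mod (arr.headD 0 - 1) 10, arr.headD 0, PySem.Int.mod (arr.headD 0 + 1) 10].filter
      (fun d => arr.all (fun x => pvNear d x))).length ≤ 1)
instance (arr : List Int) : Decidable (Pre_check_near_array_convergence_v1 arr) := by
  unfold Pre_check_near_array_convergence_v1; infer_instance

def pvWitness_check_near_array_convergence_v1 : List Int := [1, 5]

def Spec_check_near_array_convergence_v1 (arr : List Int) (out : Int) : Prop := out = check_near_array_convergence_v1_alt arr
instance (arr : List Int) (out : Int) : Decidable (Spec_check_near_array_convergence_v1 arr out) := by unfold Spec_check_near_array_convergence_v1; infer_instance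

-- ===== CLAIM (what is proved, stated in full; the proofs are below) =====
def Claim_equal_check_near_array_convergence_v1 : Prop := ∀ (arr : List Int), Dom_check_near_array_convergence_v1 arr → Pre_check_near_array_convergence_v1 arr → Spec_check_near_array_convergence_v1 arr (check_near_array_convergence_v1 arr)

-- ===== LEMMAS AND PROOFS =====

theorem pvMod (a : Int) : PySem.Int.mod a 10 = a % 10 := by
  rw [PySem.Int.mod, Int.fmod_eq_emod]; simp

-- the intersection with a neighborhood set is a filter by pvNear
theorem pvInter_nbr (s : PySem.Set Int) (x : Int) :
    PySem.Set.inter s (pvNbr x) = s.filter (fun d => pvNear d x) := by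
  show s.filter _ = s.filter _
  apply List.filter_congr
  intro d _
  refine Bool.eq_iff_iff.mpr ?_
  rw [PySem.Set.contains_iff]
  simp only [pvNbr, PySem.Set.mem_ofList, List.mem_cons, List.not_mem_nil, or_false,
    pvNear, Bool.or_eq_true, beq_iff_eq]
  constructor
  · rintro (rfl | rfl | rfl) <;> simp
  · rintro ((rfl | rfl) | rfl) <;> simp

-- characterization of A's loop: -1 if no element of set_a survives every neighborhood
-- check, else the first survivor in set_a's order
theorem pvLoopA_eq (xs : List Int) :
    ∀ s : PySem.Set Int,
      pvLoopA s xs =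
        (match s.filter (fun d => xs.all (fun x => pvNear d x)) with
         | [] => (-1 : Int)
         | g :: _ => g) := by
  induction xs with
  | nil =>
      intro s
      simp only [pvLoopA, List.all_nil, List.filter_true]
      cases s <;> rfl
  | cons x rest ih =>
      intro s
      simp only [pvLoopA, pvInter_nbr, List.all_cons]
      have hff : s.filter (fun d => (pvNear d x && rest.all (fun y => pvNear d y))) =
          (s.filter (fun d => pvNear d x)).filter (fun d => rest.all (fun y => pvNear d y)) := by
        rw [List.filter_filter]
        exact List.filter_congr (fun d _ => Bool.and_comm _ _)
      rw [hff]
      by_cases h : s.filter (fun d => pvNear d x) = []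
      · simp [PySem.Set.len, h]
      · rw [if_neg (by simpa [PySem.Set.len, List.length_eq_zero_iff] using h)]
        exact ih _

-- the three candidate centers are pairwise distinct
theorem pvCand_nodup (c : Int) :
    [PySem.Int.mod (c + 1) 10, c, PySem.Int.mod (c - 1) 10].Nodup := by
  simp only [List.nodup_cons, List.mem_cons, List.not_mem_nil,
    List.nodup_nil, and_true, not_or, pvMod, or_false]
  exact ⟨⟨by omega, by omega⟩, by omega, not_false⟩

-- a constant nonempty list has a singleton set()
theorem pvFoldl_add_const (a : Int) (xs : List Int) (h : ∀ x ∈ xs, x = a) :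
    xs.foldl PySem.Set.add [a] = [a] := by
  induction xs with
  | nil => rfl
  | cons y ys ih =>
      have hy : y = a := h y (by simp)
      subst hy
      have : PySem.Set.add [y] y = [y] := by simp [PySem.Set.add]
      simp only [List.foldl, this]
      exact ih (fun x hx => h x (by simp [hx]))

theorem pvOfList_const (a : Int) (rest : List Int) (h : ∀ x ∈ a :: rest, x = a) :
    PySem.Set.ofList (a :: rest) = [a] := by
  rw [PySem.Set.ofList_eq_foldl]
  simp only [List.foldl]
  have : PySem.Set.add ([] : PySem.Set Int) a = [a] := rfl
  rw [this]
  exact pvFoldl_add_const a rest (fun x hx => h x (by simp [hx]))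

-- each candidate center is near the head itself
theorem pvNear_cand (a d : Int)
    (hd : d ∈ [PySem.Int.mod (a - 1) 10, a, PySem.Int.mod (a + 1) 10]) :
    pvNear d a = true := by
  simp only [List.mem_cons, List.not_mem_nil, or_false] at hd
  rcases hd with rfl | rfl | rfl <;> simp [pvNear]

-- ===== VERDICT (by name: the statement is the Claim_ definition above) =====
theorem check_near_array_convergence_v1_spec : Claim_equal_check_near_array_convergence_v1 := by
  intro arr _ hpre
  unfold Spec_check_near_array_convergence_v1
  unfold check_near_array_convergence_v1 check_near_array_convergence_v1_alt
  by_cases hg : (PySem.Set.len (PySem.Set.ofList arr) == 1) = true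
  · rw [if_pos hg, if_pos hg]
  · rw [if_neg hg, if_neg hg]
    obtain ⟨hne, hdisj⟩ := hpre
    obtain ⟨a, rest, rfl⟩ : ∃ a rest, arr = a :: rest := by
      cases arr with
      | nil => exact absurd rfl hne
      | cons a rest => exact ⟨a, rest, rfl⟩
    -- the all-equal disjunct contradicts the failed guard
    have hcnt : ([PySem.Int.mod ((a :: rest).headD 0 - 1) 10, (a :: rest).headD 0,
        PySem.Int.mod ((a :: rest).headD 0 + 1) 10].filter
          (fun d => (a :: rest).all (fun x => pvNear d x))).length ≤ 1 := by
      rcases hdisj with hconst | hcnt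
      · exfalso
        apply hg
        rw [pvOfList_const a rest (by simpa using hconst)]
        rfl
      · exact hcnt
    simp only [List.headD_cons] at hcnt
    rw [PySem.List.pyGet?_zero_cons, PySem.List.slice_from_one]
    simp only [List.tail_cons]
    rw [pvLoopA_eq]
    -- A's filter runs over the reversed candidate list, restricted to rest
    have hN : pvNbr a = [PySem.Int.mod (a + 1) 10, a, PySem.Int.mod (a - 1) 10] := by
      rw [pvNbr, PySem.Set.ofList_eq_self_of_nodup _ (pvCand_nodup a)]
    -- B's filter over the full list equals the filter over rest (head check is vacuous)
    have hB : ∀ l : List Int, l = [PySem.Int.mod (a - 1) 10, a, PySem.Int.mod (a + 1) 10] →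
        l.filter (fun d => (a :: rest).all (fun x => pvNear d x)) =
        l.filter (fun d => rest.all (fun x => pvNear d x)) := by
      intro l hl
      apply List.filter_congr
      intro d hd
      rw [hl] at hd
      simp only [List.all_cons, pvNear_cand a d hd, Bool.true_and]
    have hrev : [PySem.Int.mod (a + 1) 10, a, PySem.Int.mod (a - 1) 10] =
        ([PySem.Int.mod (a - 1) 10, a, PySem.Int.mod (a + 1) 10] : List Int).reverse := rfl
    rw [hN, hrev, List.filter_reverse]
    rw [hB _ rfl] at hcnt
    rw [← hB _ rfl]
    -- a list of length ≤ 1 is its own reverse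
    have hself : ∀ l : List Int, l.length ≤ 1 → l.reverse = l := by
      intro l hl
      match l, hl with
      | [], _ => rfl
      | [g], _ => rfl
    rw [hB _ rfl, hself _ hcnt, ← hB _ rfl]
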